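-- pv_equiv track=rewrite | github.com/MVDW-SplashOS/libflatpak-js | generate_from_gir.py | hyphen_to_camel
-- ===== SOURCE A (Python) =====
-- def hyphen_to_camel(name: str) -> str:
--     """Convert hyphenated string to camelCase"""
--     parts = name.split("-")
--     if not parts:
--         return name
--     # First part remains lowercase
--     result = parts[0]
--     # Capitalize remaining parts
--     for part in parts[1:]:
--         if part:
--             result += part[0].upper() + part[1:]
--     return result
-- ===== SOURCE B (Python) =====
-- def hyphen_to_camel(name: str) -> str:
--     """Convert hyphenated string to camelCase"""
--     out = []
--     cap_next = False
--     for c in name: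
--         if c == "-":
--             cap_next = True
--         elif cap_next:
--             out.append(c.upper())
--             cap_next = False
--         else:
--             out.append(c)
--     return "".join(out)
-- ===== Notes on version B (the rewrite author's own statement) =====
-- stated objective: alternative
-- what changed: B replaces split-into-parts-then-rejoin with a single character scan that carries a cap_next flag across hyphens, never materializing the list of parts.
import Mathlib
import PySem

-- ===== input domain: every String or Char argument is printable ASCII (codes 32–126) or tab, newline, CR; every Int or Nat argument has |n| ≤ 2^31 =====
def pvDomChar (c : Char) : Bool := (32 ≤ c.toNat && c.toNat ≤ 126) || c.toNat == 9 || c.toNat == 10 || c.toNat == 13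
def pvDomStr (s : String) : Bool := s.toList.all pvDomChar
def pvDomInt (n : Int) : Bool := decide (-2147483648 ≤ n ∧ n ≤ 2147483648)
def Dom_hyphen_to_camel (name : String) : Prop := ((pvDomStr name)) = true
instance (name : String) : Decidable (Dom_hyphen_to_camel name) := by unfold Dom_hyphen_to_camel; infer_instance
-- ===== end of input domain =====

-- B does a single character scan carrying a cap_next flag instead of splitting on "-" and rejoining; same cost, no parts list.

-- ===== PORT A =====
def hyphen_to_camel (name : String) : String :=
  let parts := PySem.Chars.splitOn name.toList ['-']
  if parts = [] then name
  else
    let result := parts.headD []                       -- parts[0]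
    let result := (PySem.List.slice parts (some 1) none).foldl   -- parts[1:]
      (fun result part =>
        match part with                                -- if part: result += part[0].upper() + part[1:]
        | [] => result
        | p0 :: rest => result ++ (PySem.Chars.upperChar p0 :: rest)) result
    String.ofList result

-- ===== PORT B =====
def hyphen_to_camel_alt (name : String) : String :=
  let st := name.toList.foldl
    (fun (st : Bool × List Char) c =>
      if c = '-' then (true, st.2)
      else if st.1 then (false, st.2 ++ [PySem.Chars.upperChar c])
      else (false, st.2 ++ [c]))
    (false, [])
  String.ofList st.2

-- ===== PRECONDITION & SPEC =====
def Spec_hyphen_to_camel (name : String) (out : String) : Prop := out = hyphen_to_camel_alt name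
instance (name : String) (out : String) : Decidable (Spec_hyphen_to_camel name out) := by unfold Spec_hyphen_to_camel; infer_instance

-- ===== CLAIM (what is proved, stated in full; the proofs are below) =====
def Claim_equal_hyphen_to_camel : Prop := ∀ (name : String), Dom_hyphen_to_camel name → Spec_hyphen_to_camel name (hyphen_to_camel name)

-- ===== LEMMAS AND PROOFS =====

-- Structural single-char split: (first part, remaining parts) of splitting on '-'.
def splitCh : List Char → List Char × List (List Char)
  | [] => ([], [])
  | c :: rest =>
    let (h, t) := splitCh rest
    if c = '-' then ([], h :: t) else (c :: h, t)

-- capitalize the first char of a part (A's part[0].upper() + part[1:], empty part contributes nothing)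
def capPart : List Char → List Char
  | [] => []
  | c :: rest => PySem.Chars.upperChar c :: rest

def camelTail : List (List Char) → List Char
  | [] => []
  | p :: ps => capPart p ++ camelTail ps

-- B's scan, structurally
def scan : Bool → List Char → List Char
  | _, [] => []
  | b, c :: rest =>
    if c = '-' then scan true rest
    else (if b then PySem.Chars.upperChar c else c) :: scan false rest

lemma splitOn_go_spec : ∀ (fuel : Nat) (l cur : List Char) (acc : List (List Char)),
    l.length < fuel →
    PySem.Chars.splitOn.go ['-'] fuel l cur acc
      = acc.reverse ++ (cur.reverse ++ (splitCh l).1) :: (splitCh l).2 := by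
  intro fuel
  induction fuel with
  | zero => intro l cur acc h; omega
  | succ n ih =>
    intro l cur acc h
    cases l with
    | nil => simp [PySem.Chars.splitOn.go, splitCh]
    | cons c rest =>
      simp only [PySem.Chars.splitOn.go, List.isPrefixOf]
      by_cases hc : c = '-'
      · subst hc
        rw [if_pos (by simp)]
        rw [show List.drop ['-'].length ('-' :: rest) = rest from rfl]
        rw [ih rest [] _ (by simpa using Nat.lt_of_succ_lt_succ h)]
        simp [splitCh]
      · rw [if_neg (by simp; intro hh; exact hc hh.symm)]
        rw [ih rest (c :: cur) acc (by simpa using Nat.lt_of_succ_lt_succ h)]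
        simp [splitCh, hc]

lemma splitOn_eq_splitCh (l : List Char) :
    PySem.Chars.splitOn l ['-'] = (splitCh l).1 :: (splitCh l).2 := by
  unfold PySem.Chars.splitOn
  rw [splitOn_go_spec (l.length + 1) l [] [] (by omega)]
  simp

lemma scan_eq_split : ∀ l : List Char,
    scan false l = (splitCh l).1 ++ camelTail (splitCh l).2 ∧
    scan true l = capPart (splitCh l).1 ++ camelTail (splitCh l).2 := by
  intro l
  induction l with
  | nil => simp [scan, splitCh, camelTail, capPart]
  | cons c rest ih =>
    by_cases hc : c = '-'
    · subst hc
      constructor <;>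
        simp [scan, splitCh, camelTail, capPart, ih.2]
    · constructor <;>
        simp [scan, splitCh, hc, capPart, ih.1]

lemma foldl_camel :
    ∀ (ps : List (List Char)) (r : List Char),
    ps.foldl (fun result part =>
      match part with
      | [] => result
      | p0 :: rest => result ++ (PySem.Chars.upperChar p0 :: rest)) r = r ++ camelTail ps := by
  intro ps
  induction ps with
  | nil => simp [camelTail]
  | cons p ps ih =>
    intro r
    cases p with
    | nil => simp [List.foldl, camelTail, capPart, ih]
    | cons p0 rest => simp [List.foldl, camelTail, capPart, ih]

lemma scan_foldl : ∀ (l : List Char) (b : Bool) (acc : List Char),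
    (l.foldl (fun (st : Bool × List Char) c =>
      if c = '-' then (true, st.2)
      else if st.1 then (false, st.2 ++ [PySem.Chars.upperChar c])
      else (false, st.2 ++ [c])) (b, acc)).2 = acc ++ scan b l := by
  intro l
  induction l with
  | nil => simp [scan]
  | cons c rest ih =>
    intro b acc
    by_cases hc : c = '-'
    · subst hc; simp [List.foldl, scan, ih]
    · cases b <;> simp [List.foldl, scan, hc, ih]

-- ===== VERDICT (by name: the statement is the Claim_ definition above) =====
theorem hyphen_to_camel_spec : Claim_equal_hyphen_to_camel := by
  intro name _
  show hyphen_to_camel name = hyphen_to_camel_alt name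
  unfold hyphen_to_camel hyphen_to_camel_alt
  rw [splitOn_eq_splitCh]
  simp only [reduceCtorEq, ite_false, List.headD_cons]
  rw [PySem.List.slice_from _ (by norm_num), foldl_camel, scan_foldl]
  simp only [Int.toNat_one, List.drop_succ_cons, List.drop_zero, List.nil_append]
  rw [(scan_eq_split name.toList).1]
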